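-- pv_equiv track=rewrite | github.com/JoshKarpel/dagger | dagvis.py | nodes_to_layers
-- ===== SOURCE A (Python) =====
-- import collections
--
-- def nodes_to_layers(nodes, prefixes):
--     layer_to_width = collections.Counter()
--     for node in nodes:
--         prefix = max(p for p in prefixes if node.startswith(p))
--         layer_to_width[prefix] += 1
--
--     if sum(layer_to_width.values()) != len(nodes):
--         missing = "\n".join(
--             n for n in nodes if not any(n.startswith(prefix) for prefix in prefixes)
--         )
--         raise Exception(f"Missing prefixes! Remaining nodes:\n{missing}")
--
--     return layer_to_width
-- ===== SOURCE B (Python) =====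
-- def nodes_to_layers(nodes, prefixes):
--     # Longest matching prefix per node via a hash set of prefixes: try the
--     # node's own prefixes from longest to shortest, O((N+P)*L) overall.
--     pset = set(prefixes)
--     counts = {}
--     for node in nodes:
--         for k in range(len(node), -1, -1):
--             p = node[:k]
--             if p in pset:
--                 counts[p] = counts.get(p, 0) + 1
--                 break
--         else:
--             raise ValueError(f"no matching prefix for {node!r}")
--     return counts
-- ===== Notes on version B (the rewrite author's own statement) =====
-- stated objective: faster
-- what changed: Instead of scanning all prefixes per node and taking max(), B builds a hash set of prefixes once and probes each node's own prefixes longest-first, so the per-node cost is the node length, not the number of prefixes.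
import Mathlib
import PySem

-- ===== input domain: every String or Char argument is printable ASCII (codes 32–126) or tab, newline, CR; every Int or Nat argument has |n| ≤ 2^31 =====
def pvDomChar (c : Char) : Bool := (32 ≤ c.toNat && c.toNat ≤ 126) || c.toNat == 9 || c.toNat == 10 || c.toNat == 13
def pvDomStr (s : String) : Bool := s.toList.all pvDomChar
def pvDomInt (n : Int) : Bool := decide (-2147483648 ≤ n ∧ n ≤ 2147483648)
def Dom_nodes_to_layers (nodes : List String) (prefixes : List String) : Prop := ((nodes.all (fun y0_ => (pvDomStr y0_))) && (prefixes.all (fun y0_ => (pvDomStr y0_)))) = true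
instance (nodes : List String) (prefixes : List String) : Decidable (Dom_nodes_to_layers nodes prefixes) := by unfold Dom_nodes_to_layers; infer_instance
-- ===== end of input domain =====

-- ===== PORT A =====
-- B differs only in how each node's longest matching prefix is found; equal return values on Pre_ (no matching prefix ⇒ both raise).
-- max(p for p in prefixes if node.startswith(p)); Python raises ValueError on an empty generator → none, excluded by Pre_
def aMatch (node : String) (prefixes : List String) : Option String :=
  PySem.List.max? (prefixes.filter (fun p => PySem.Str.startswith node p)) (fun p => p)

def nodes_to_layers (nodes : List String) (prefixes : List String) : List (String × Int) :=
  let d := nodes.foldl (fun d node =>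
    match aMatch node prefixes with
    | some pfx => d.modify pfx 0 (· + 1)
    | none => d) PySem.Dict.empty   -- none: Python already raised; unreachable under Pre_
  if d.values.sum = (nodes.length : Int) then d.items
  else []   -- Python raises Exception here; unreachable under Pre_

-- ===== PORT B =====
-- for k in range(len(node), -1, -1): if node[:k] in pset: take it — ported as recursion on k
def bFind (cs : List Char) (pset : PySem.Set String) : Nat → Option String
  | 0 =>
    if PySem.Set.contains pset (String.ofList (cs.take 0)) then some (String.ofList (cs.take 0))
    else none   -- loop exhausted: Python B raises ValueError; unreachable under Pre_
  | k + 1 =>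
    if PySem.Set.contains pset (String.ofList (cs.take (k + 1))) then some (String.ofList (cs.take (k + 1)))
    else bFind cs pset k

def nodes_to_layers_alt (nodes : List String) (prefixes : List String) : List (String × Int) :=
  let pset : PySem.Set String := PySem.Set.ofList prefixes
  (nodes.foldl (fun d node =>
    match bFind node.toList pset node.toList.length with
    | some p => d.insert p (d.getD p 0 + 1)
    | none => d) PySem.Dict.empty).items

-- ===== PRECONDITION & SPEC =====
-- Pre_ excludes inputs where some node matches no prefix: there Python A raises ValueError (max of empty generator), and B raises too.
def Pre_nodes_to_layers (nodes : List String) (prefixes : List String) : Prop :=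
  (nodes.all (fun node => prefixes.any (fun p => PySem.Str.startswith node p))) = true

instance (nodes : List String) (prefixes : List String) : Decidable (Pre_nodes_to_layers nodes prefixes) := by unfold Pre_nodes_to_layers; infer_instance

def pvWitness_nodes_to_layers : List String × List String :=
  (["ab", "ac", "b"], ["a", "ab", "b"])

def Spec_nodes_to_layers (nodes : List String) (prefixes : List String) (out : List (String × Int)) : Prop := out = nodes_to_layers_alt nodes prefixes
instance (nodes : List String) (prefixes : List String) (out : List (String × Int)) : Decidable (Spec_nodes_to_layers nodes prefixes out) := by unfold Spec_nodes_to_layers; infer_instance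

-- ===== CLAIM (what is proved, stated in full; the proofs are below) =====
def Claim_equal_nodes_to_layers : Prop := ∀ (nodes : List String) (prefixes : List String), Dom_nodes_to_layers nodes prefixes → Pre_nodes_to_layers nodes prefixes → Spec_nodes_to_layers nodes prefixes (nodes_to_layers nodes prefixes)

-- ===== LEMMAS AND PROOFS =====

-- bFind returns some ⟨cs.take j⟩ for the largest j ≤ k with cs.take j in the set
theorem bFind_spec (cs : List Char) (pset : PySem.Set String) (k : Nat) (r : String)
    (h : bFind cs pset k = some r) :
    ∃ j ≤ k, r = String.ofList (cs.take j) ∧ String.ofList (cs.take j) ∈ pset ∧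
      ∀ i, j < i → i ≤ k → String.ofList (cs.take i) ∉ pset := by
  induction k with
  | zero =>
    simp only [bFind] at h
    split at h
    · rename_i hc
      refine ⟨0, le_refl _, by simpa using h.symm, ?_, by omega⟩
      simpa [PySem.Set.contains_iff] using hc
    · exact absurd h (by simp)
  | succ k ih =>
    simp only [bFind] at h
    split at h
    · rename_i hc
      refine ⟨k + 1, le_refl _, by simpa using h.symm, ?_, by omega⟩
      simpa [PySem.Set.contains_iff] using hc
    · rename_i hc
      obtain ⟨j, hj, hr, hm, hmax⟩ := ih h
      refine ⟨j, by omega, hr, hm, fun i hji hik => ?_⟩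
      rcases Nat.lt_or_ge i (k + 1) with h1 | h1
      · exact hmax i hji (by omega)
      · have : i = k + 1 := by omega
        subst this
        simpa [PySem.Set.contains_iff] using hc

theorem bFind_isSome (cs : List Char) (pset : PySem.Set String) (k j : Nat)
    (hj : j ≤ k) (hmem : String.ofList (cs.take j) ∈ pset) :
    (bFind cs pset k).isSome := by
  induction k with
  | zero =>
    have : j = 0 := by omega
    subst this
    simp only [bFind, List.take_zero] at hmem ⊢
    have : String.ofList [] = "" := rfl
    rw [this] at hmem
    simp [hmem]
  | succ k ih =>
    simp only [bFind]
    split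
    · simp
    · rename_i hc
      apply ih
      rcases Nat.lt_or_ge j (k + 1) with h1 | h1
      · omega
      · have : j = k + 1 := by omega
        subst this
        exact absurd (by simpa [PySem.Set.contains_iff] using hmem) hc

theorem lex_self_append (p t : List Char) (c : Char) : p < p ++ c :: t := by
  induction p with
  | nil => exact List.Lex.nil
  | cons a p ih => exact List.Lex.cons ih

-- a prefix of a list of chars is ≤ it in Python's string order
theorem prefix_le (p q : List Char) (h : p <+: q) : String.ofList p ≤ String.ofList q := by
  rw [String.le_iff_toList_le]
  obtain ⟨t, rfl⟩ := h
  cases t with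
  | nil => simp
  | cons c t => simp only [String.toList_ofList]; exact le_of_lt (lex_self_append p t c)

-- per node, A's lexicographic max over matching prefixes = B's longest hash-set hit
theorem match_agree (node : String) (prefixes : List String)
    (hex : prefixes.any (fun p => PySem.Str.startswith node p) = true) :
    aMatch node prefixes = bFind node.toList (PySem.Set.ofList prefixes) node.toList.length := by
  obtain ⟨p0, hp0, hs0⟩ := List.any_eq_true.mp hex
  simp only [aMatch]
  cases hmax : PySem.List.max? (prefixes.filter (fun p => PySem.Str.startswith node p)) (fun p => p) with
  | none =>
    rw [PySem.List.max?_eq_none_iff] at hmax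
    exact absurd hmax (by simp [List.filter_eq_nil_iff]; exact ⟨p0, hp0, hs0⟩)
  | some m =>
    have hmS := PySem.List.max?_mem hmax
    have hmP : m ∈ prefixes := (List.mem_filter.mp hmS).1
    have hmSt : m.toList <+: node.toList := by
      have := (List.mem_filter.mp hmS).2
      simpa [PySem.Str.startswith_eq, PySem.Chars.startswith_iff] using this
    have hmTake : node.toList.take m.toList.length = m.toList := (List.prefix_iff_eq_take.mp hmSt).symm
    have hjle : m.toList.length ≤ node.toList.length := hmSt.length_le
    have hsome := bFind_isSome node.toList (PySem.Set.ofList prefixes) node.toList.length m.toList.length hjle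
      (by rw [hmTake]; simpa [PySem.Set.mem_ofList] using hmP)
    obtain ⟨b, hb⟩ := Option.isSome_iff_exists.mp hsome
    obtain ⟨j, hjk, hbr, hbm, hmaxi⟩ := bFind_spec _ _ _ _ hb
    have hbP : b ∈ prefixes := by rw [hbr]; simpa [PySem.Set.mem_ofList] using hbm
    have hbS : b ∈ prefixes.filter (fun p => PySem.Str.startswith node p) := by
      rw [List.mem_filter]
      refine ⟨hbP, ?_⟩
      rw [hbr]
      simp [PySem.Str.startswith_eq, PySem.Chars.startswith_iff, List.take_prefix]
    have h1 : b ≤ m := PySem.List.max?_isMax hmax b hbS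
    have hjj : m.toList.length ≤ j := by
      by_contra hlt
      exact hmaxi m.toList.length (by omega) hjle (by rw [hmTake]; simpa [PySem.Set.mem_ofList] using hmP)
    have h2 : m ≤ b := by
      have : m.toList <+: node.toList.take j := by
        rw [← hmTake]
        exact List.take_prefix_take_left hjj
      have := prefix_le _ _ this
      rwa [String.ofList_toList, ← hbr] at this
    rw [hb]
    exact congrArg some (le_antisymm h2 h1)

theorem aMatch_isSome (node : String) (prefixes : List String)
    (hex : prefixes.any (fun p => PySem.Str.startswith node p) = true) :
    (aMatch node prefixes).isSome := by
  cases hmax : aMatch node prefixes with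
  | some m => rfl
  | none =>
    obtain ⟨p0, hp0, hs0⟩ := List.any_eq_true.mp hex
    simp only [aMatch, PySem.List.max?_eq_none_iff] at hmax
    exact absurd hmax (by simp [List.filter_eq_nil_iff]; exact ⟨p0, hp0, hs0⟩)

-- A's loop is the Counter loop over the list of chosen prefixes
theorem foldA_eq (nodes prefixes : List String)
    (h : ∀ node ∈ nodes, prefixes.any (fun p => PySem.Str.startswith node p) = true)
    (d : PySem.Dict String Int) :
    (nodes.foldl (fun d node =>
      match aMatch node prefixes with
      | some pfx => d.modify pfx 0 (· + 1)
      | none => d) d) =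
    ((nodes.map (fun n => (aMatch n prefixes).getD "")).foldl
      (fun d x => d.modify x 0 (· + 1)) d) := by
  induction nodes generalizing d with
  | nil => rfl
  | cons node t ih =>
    obtain ⟨m, hm⟩ := Option.isSome_iff_exists.mp (aMatch_isSome node prefixes (h node (by simp)))
    simp only [List.foldl_cons, List.map_cons, hm, Option.getD_some]
    exact ih (fun n hn => h n (by simp [hn])) _

-- B's loop is the insert-form Counter loop over the same chosen prefixes
theorem foldB_eq (nodes prefixes : List String)
    (h : ∀ node ∈ nodes, prefixes.any (fun p => PySem.Str.startswith node p) = true)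
    (d : PySem.Dict String Int) :
    (nodes.foldl (fun d node =>
      match bFind node.toList (PySem.Set.ofList prefixes) node.toList.length with
      | some p => d.insert p (d.getD p 0 + 1)
      | none => d) d) =
    ((nodes.map (fun n => (aMatch n prefixes).getD "")).foldl
      (fun d x => d.insert x (d.getD x 0 + 1)) d) := by
  induction nodes generalizing d with
  | nil => rfl
  | cons node t ih =>
    have hex := h node (by simp)
    obtain ⟨m, hm⟩ := Option.isSome_iff_exists.mp (aMatch_isSome node prefixes hex)
    have hbf : bFind node.toList (PySem.Set.ofList prefixes) node.toList.length = some m := by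
      rw [← match_agree node prefixes hex]; exact hm
    simp only [List.foldl_cons, List.map_cons, hm, hbf, Option.getD_some]
    exact ih (fun n hn => h n (by simp [hn])) _

-- Counter values sum to the list length
theorem counter_values_sum (xs : List String) :
    (PySem.Dict.counter xs).values.sum = (xs.length : Int) := by
  have hperm : (PySem.Set.ofList xs).Perm xs.dedup := by
    rw [List.perm_ext_iff_of_nodup (PySem.Set.nodup_ofList xs) xs.nodup_dedup]
    intro a
    rw [PySem.Set.mem_ofList, List.mem_dedup]
  have : (PySem.Dict.counter xs).values =
      (PySem.Set.ofList xs).map (fun k => (xs.count k : Int)) := by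
    show ((PySem.Dict.counter xs).items).map (·.2) = _
    rw [PySem.Dict.items_counter]
    simp
  rw [this, (hperm.map (fun k => (xs.count k : Int))).sum_eq]
  have : (xs.dedup.map (fun k => (xs.count k : Int))).sum
      = ((xs.dedup.map (fun k => xs.count k)).sum : Int) := by
    induction xs.dedup with
    | nil => simp
    | cons a t ih => simp [ih]
  rw [this, List.sum_map_count_dedup_eq_length]

-- ===== VERDICT (by name: the statement is the Claim_ definition above) =====
theorem nodes_to_layers_spec : Claim_equal_nodes_to_layers := by
  intro nodes prefixes _ hpre
  have h : ∀ node ∈ nodes, prefixes.any (fun p => PySem.Str.startswith node p) = true :=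
    List.all_eq_true.mp hpre
  show nodes_to_layers nodes prefixes = nodes_to_layers_alt nodes prefixes
  simp only [nodes_to_layers, nodes_to_layers_alt]
  rw [foldA_eq nodes prefixes h, foldB_eq nodes prefixes h]
  rw [← PySem.Dict.counter_eq_foldl, PySem.Dict.foldl_insert_getD_add_one_eq_counter]
  rw [counter_values_sum]
  simp
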